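-- pv_equiv track=rewrite | github.com/bihealth/svirlpool | src/svirlpool/localassembly/consensus.py | get_max_extents_of_read_alignments_on_cr
-- ===== SOURCE A (Python) =====
-- def get_max_extents_of_read_alignments_on_cr(
--     dict_all_intervals: dict[str, list[tuple[int, int, str, int, int]]],
-- ) -> dict[str, tuple[int, int, str, int, str, int]]:
--     """Returns a dict of the form {readname:(read_start,read_end,ref_start,ref_end)}"""
--     dict_max_extents = {}
--     for readname, intervals in dict_all_intervals.items():
--         min_read_start = min(
--             start for (start, end, ref_chr, ref_start, ref_end) in intervals
--         )
--         max_read_end = max(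
--             end for (start, end, ref_chr, ref_start, ref_end) in intervals
--         )
--         min_ref = min(
--             (ref_start, ref_chr)
--             for (start, end, ref_chr, ref_start, ref_end) in intervals
--         )
--         max_ref = max(
--             (ref_end, ref_chr)
--             for (start, end, ref_chr, ref_start, ref_end) in intervals
--         )
--         dict_max_extents[readname] = (
--             min_read_start,
--             max_read_end,
--             min_ref[1],
--             min_ref[0],
--             max_ref[1],
--             max_ref[0],
--         )
--     return dict_max_extents
-- ===== SOURCE B (Python) =====
-- def get_max_extents_of_read_alignments_on_cr(dict_all_intervals):
--     """Single pass per read: four accumulators instead of four comprehensions."""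
--     dict_max_extents = {}
--     for readname, intervals in dict_all_intervals.items():
--         (s0, e0, rc0, rs0, re0) = intervals[0]
--         min_read_start = s0
--         max_read_end = e0
--         min_ref = (rs0, rc0)
--         max_ref = (re0, rc0)
--         for (s, e, rc, rs, re) in intervals[1:]:
--             if s < min_read_start:
--                 min_read_start = s
--             if e > max_read_end:
--                 max_read_end = e
--             if (rs, rc) < min_ref:
--                 min_ref = (rs, rc)
--             if (re, rc) > max_ref:
--                 max_ref = (re, rc)
--         dict_max_extents[readname] = (
--             min_read_start,
--             max_read_end,
--             min_ref[1],
--             min_ref[0],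
--             max_ref[1],
--             max_ref[0],
--         )
--     return dict_max_extents
-- ===== Notes on version B (the rewrite author's own statement) =====
-- stated objective: faster
-- what changed: The four separate min/max comprehension passes over each read's intervals are fused into one pass maintaining four accumulators seeded from the first interval.
import Mathlib
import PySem

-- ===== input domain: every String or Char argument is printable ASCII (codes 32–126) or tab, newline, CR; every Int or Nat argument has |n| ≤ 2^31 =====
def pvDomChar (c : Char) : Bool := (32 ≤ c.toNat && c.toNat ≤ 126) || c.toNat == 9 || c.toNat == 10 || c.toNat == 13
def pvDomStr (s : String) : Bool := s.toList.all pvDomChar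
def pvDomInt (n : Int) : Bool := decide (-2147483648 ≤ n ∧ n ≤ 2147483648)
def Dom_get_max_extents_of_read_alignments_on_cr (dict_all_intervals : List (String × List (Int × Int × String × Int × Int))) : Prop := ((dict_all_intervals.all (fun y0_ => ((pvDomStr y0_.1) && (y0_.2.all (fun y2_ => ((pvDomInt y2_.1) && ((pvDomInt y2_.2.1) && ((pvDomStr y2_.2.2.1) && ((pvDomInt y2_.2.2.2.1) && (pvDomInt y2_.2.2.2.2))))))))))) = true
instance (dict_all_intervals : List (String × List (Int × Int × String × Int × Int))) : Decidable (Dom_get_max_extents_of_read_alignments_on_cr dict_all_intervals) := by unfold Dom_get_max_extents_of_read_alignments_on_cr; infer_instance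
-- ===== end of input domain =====

-- B fuses A's four min/max comprehension passes per read into one accumulator pass (constant-factor objective).

-- Python tuple comparison (int, str) < (int, str), lexicographic; exact for the ASCII domain.
def pvPairLt (a b : Int × String) : Bool :=
  if a.1 < b.1 then true else if a.1 = b.1 then decide (a.2 < b.2) else false

-- ===== PORT A =====
-- Python's min/max over a nonempty generator keep the FIRST extremal element: folds with strict comparison.
def get_max_extents_of_read_alignments_on_cr (dict_all_intervals : List (String × List (Int × Int × String × Int × Int))) : List (String × Int × Int × String × Int × String × Int) :=
  (dict_all_intervals.foldl (fun d p =>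
    match p with
    | (readname, intervals) =>
      match intervals with
      | [] => d  -- Python raises ValueError here (min of empty sequence); excluded by Pre_
      | (s0, e0, rc0, rs0, re0) :: t =>
        let min_read_start := t.foldl (fun a iv => if iv.1 < a then iv.1 else a) s0
        let max_read_end := t.foldl (fun a iv => if a < iv.2.1 then iv.2.1 else a) e0
        let min_ref := t.foldl (fun a iv => if pvPairLt (iv.2.2.2.1, iv.2.2.1) a then (iv.2.2.2.1, iv.2.2.1) else a) (rs0, rc0)
        let max_ref := t.foldl (fun a iv => if pvPairLt a (iv.2.2.2.2, iv.2.2.1) then (iv.2.2.2.2, iv.2.2.1) else a) (re0, rc0)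
        d.insert readname (min_read_start, max_read_end, min_ref.2, min_ref.1, max_ref.2, max_ref.1))
    (PySem.Dict.empty)).items

-- ===== PORT B =====
-- one fold per read carrying the four accumulators as a single state
def get_max_extents_of_read_alignments_on_cr_alt (dict_all_intervals : List (String × List (Int × Int × String × Int × Int))) : List (String × Int × Int × String × Int × String × Int) :=
  (dict_all_intervals.foldl (fun d p =>
    match p with
    | (readname, intervals) =>
      match intervals with
      | [] => d  -- Python raises IndexError here; excluded by Pre_
      | (s0, e0, rc0, rs0, re0) :: t =>
        let st := t.foldl (fun (st : Int × Int × (Int × String) × (Int × String)) iv =>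
          match iv with
          | (s, e, rc, rs, re) =>
            (if s < st.1 then s else st.1,
             if st.2.1 < e then e else st.2.1,
             if pvPairLt (rs, rc) st.2.2.1 then (rs, rc) else st.2.2.1,
             if pvPairLt st.2.2.2 (re, rc) then (re, rc) else st.2.2.2))
          (s0, e0, (rs0, rc0), (re0, rc0))
        d.insert readname (st.1, st.2.1, st.2.2.1.2, st.2.2.1.1, st.2.2.2.2, st.2.2.2.1))
    (PySem.Dict.empty)).items

-- ===== PRECONDITION & SPEC =====
-- Pre_ excludes inputs with an empty interval list, on which Python A raises ValueError (min of empty sequence).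
def Pre_get_max_extents_of_read_alignments_on_cr (dict_all_intervals : List (String × List (Int × Int × String × Int × Int))) : Prop :=
  ∀ p ∈ dict_all_intervals, p.2 ≠ []
instance (dict_all_intervals : List (String × List (Int × Int × String × Int × Int))) : Decidable (Pre_get_max_extents_of_read_alignments_on_cr dict_all_intervals) := by unfold Pre_get_max_extents_of_read_alignments_on_cr; infer_instance
def pvWitness_get_max_extents_of_read_alignments_on_cr : (List (String × List (Int × Int × String × Int × Int))) := [("r1", [(1, 9, "chr1", 100, 200), (0, 5, "chr2", 50, 300)])]
def Spec_get_max_extents_of_read_alignments_on_cr (dict_all_intervals : List (String × List (Int × Int × String × Int × Int))) (out : List (String × Int × Int × String × Int × String × Int)) : Prop := out = get_max_extents_of_read_alignments_on_cr_alt dict_all_intervals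
instance (dict_all_intervals : List (String × List (Int × Int × String × Int × Int))) (out : List (String × Int × Int × String × Int × String × Int)) : Decidable (Spec_get_max_extents_of_read_alignments_on_cr dict_all_intervals out) := by unfold Spec_get_max_extents_of_read_alignments_on_cr; exact @List.hasDecEq _ (fun a b => inferInstance) out (get_max_extents_of_read_alignments_on_cr_alt dict_all_intervals)

-- ===== CLAIM (what is proved, stated in full; the proofs are below) =====
def Claim_equal_get_max_extents_of_read_alignments_on_cr : Prop := ∀ (dict_all_intervals : List (String × List (Int × Int × String × Int × Int))), Dom_get_max_extents_of_read_alignments_on_cr dict_all_intervals → Pre_get_max_extents_of_read_alignments_on_cr dict_all_intervals → Spec_get_max_extents_of_read_alignments_on_cr dict_all_intervals (get_max_extents_of_read_alignments_on_cr dict_all_intervals)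

-- ===== LEMMAS AND PROOFS =====

-- fusion: B's single fold computes exactly A's four folds
theorem pv_fuse (t : List (Int × Int × String × Int × Int)) (a b : Int) (c d : Int × String) :
    t.foldl (fun (st : Int × Int × (Int × String) × (Int × String)) iv =>
      match iv with
      | (s, e, rc, rs, re) =>
        (if s < st.1 then s else st.1,
         if st.2.1 < e then e else st.2.1,
         if pvPairLt (rs, rc) st.2.2.1 then (rs, rc) else st.2.2.1,
         if pvPairLt st.2.2.2 (re, rc) then (re, rc) else st.2.2.2)) (a, b, c, d)
    = (t.foldl (fun a iv => if iv.1 < a then iv.1 else a) a,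
       t.foldl (fun a iv => if a < iv.2.1 then iv.2.1 else a) b,
       t.foldl (fun a iv => if pvPairLt (iv.2.2.2.1, iv.2.2.1) a then (iv.2.2.2.1, iv.2.2.1) else a) c,
       t.foldl (fun a iv => if pvPairLt a (iv.2.2.2.2, iv.2.2.1) then (iv.2.2.2.2, iv.2.2.1) else a) d) := by
  induction t generalizing a b c d with
  | nil => rfl
  | cons hd tl ih =>
    obtain ⟨s, e, rc, rs, re⟩ := hd
    simp only [List.foldl_cons]
    exact ih _ _ _ _

-- ===== VERDICT (by name: the statement is the Claim_ definition above) =====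
theorem get_max_extents_of_read_alignments_on_cr_spec : Claim_equal_get_max_extents_of_read_alignments_on_cr := by
  intro l _ _
  unfold Spec_get_max_extents_of_read_alignments_on_cr
  unfold get_max_extents_of_read_alignments_on_cr get_max_extents_of_read_alignments_on_cr_alt
  congr 1
  apply PySem.List.foldl_congr_mem
  intro d p _
  obtain ⟨readname, intervals⟩ := p
  match intervals with
  | [] => rfl
  | (s0, e0, rc0, rs0, re0) :: t =>
    simp only [pv_fuse]
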